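-- pv_equiv track=rewrite | github.com/kz-myodoo/SmartOdoo | app/core/smartodoo_gui.py | _normalize_github_repo_url
-- ===== SOURCE A (Python) =====
-- def _normalize_github_repo_url(addons_url: str) -> str:
--     url = addons_url.strip()
--     if not url or "github.com" not in url:
--         return ""
--
--     if url.startswith("git@github.com:"):
--         repo_part = url[len("git@github.com:"):].strip("/")
--         segments = [segment for segment in repo_part.split("/") if segment]
--         if len(segments) < 2:
--             return ""
--         owner, repo = segments[0], segments[1]
--         repo = repo[:-4] if repo.endswith(".git") else repo
--         return f"git@github.com:{owner}/{repo}.git"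
--
--     if "/tree/" in url:
--         url = url.split("/tree/", 1)[0]
--     url = url.split("?", 1)[0].split("#", 1)[0].rstrip("/")
--     if not url.startswith("http://") and not url.startswith("https://"):
--         return ""
--
--     parts = [segment for segment in url.split("/") if segment]
--     if len(parts) < 5:
--         return ""
--     owner, repo = parts[3], parts[4]
--     repo = repo[:-4] if repo.endswith(".git") else repo
--     return f"https://github.com/{owner}/{repo}.git"
-- ===== SOURCE B (Python) =====
-- def _normalize_github_repo_url(addons_url: str) -> str:
--     url = addons_url.strip()
--     if "github.com" not in url:
--         return ""
--     if url.startswith("git@github.com:"):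
--         prefix, body, skip = "git@github.com:", url[len("git@github.com:"):], 0
--     else:
--         # truncate at the earliest of '/tree/', '?', '#' in one min-cut pass
--         cut = len(url)
--         for delim in ("/tree/", "?", "#"):
--             pos = url.find(delim)
--             if 0 <= pos < cut:
--                 cut = pos
--         body = url[:cut].rstrip("/")
--         if not (body.startswith("http://") or body.startswith("https://")):
--             return ""
--         prefix, skip = "https://github.com/", 3
--     # single pointer scan: grab the skip-th and (skip+1)-th nonempty '/'-segments
--     owner = repo = ""
--     i, n, seen = 0, len(body), 0
--     while i < n:
--         if body[i] == "/":
--             i += 1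
--             continue
--         j = i
--         while j < n and body[j] != "/":
--             j += 1
--         if seen == skip:
--             owner = body[i:j]
--         elif seen == skip + 1:
--             repo = body[i:j]
--             break
--         seen += 1
--         i = j
--     if not repo:
--         return ""
--     return f"{prefix}{owner}/{repo.removesuffix('.git')}.git"
-- ===== Notes on version B (the rewrite author's own statement) =====
-- stated objective: alternative
-- what changed: B replaces A's split-into-lists pipeline by a scanning strategy: the tree/query/fragment truncation becomes a single min-of-first-occurrences cut instead of A's chain of conditional split-take-first passes, and owner/repo are extracted by one two-pointer character scan that walks the string once, skipping slash runs and grabbing the skip-th and next nonempty segments with early exit, instead of A's per-branch build-a-filtered-segment-list-then-index code.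
import Mathlib
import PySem

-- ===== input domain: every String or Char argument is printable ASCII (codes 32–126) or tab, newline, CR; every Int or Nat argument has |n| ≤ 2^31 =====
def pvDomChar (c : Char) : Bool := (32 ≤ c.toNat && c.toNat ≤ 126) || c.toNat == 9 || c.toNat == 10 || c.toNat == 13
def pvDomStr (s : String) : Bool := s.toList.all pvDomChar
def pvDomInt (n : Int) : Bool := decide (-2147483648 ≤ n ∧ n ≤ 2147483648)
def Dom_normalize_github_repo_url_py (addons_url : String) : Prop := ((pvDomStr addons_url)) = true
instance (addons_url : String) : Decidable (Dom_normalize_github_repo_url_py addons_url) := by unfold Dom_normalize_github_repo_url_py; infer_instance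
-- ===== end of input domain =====

-- B replaces A's split-into-filtered-lists pipeline by scanning: one min-of-first-occurrences cut
-- for '/tree/'/'?'/'#' and a single two-pointer scan extracting the two wanted '/'-segments.

-- ===== PORT A =====
-- url.rstrip("/") : drop trailing characters belonging to the set {'/'} (exact for this one-char set)
def pyRstripSlash (u : List Char) : List Char := (List.dropWhile (fun c => c == '/') u.reverse).reverse
-- url.split(sep, 1)[0] : sep ≠ "", split returns a nonempty list so [0] is its head
def pySplit1Head (u sep : List Char) : List Char := (PySem.Chars.splitOnMax u sep 1).headI

def normalize_github_repo_url_py (addons_url : String) : String :=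
  let url := PySem.Chars.strip addons_url.toList
  if url.isEmpty || !(PySem.Chars.isIn "github.com".toList url) then "" else
  if PySem.Chars.startswith url "git@github.com:".toList then
    -- url[len("git@github.com:"):].strip("/")
    let repo_part := PySem.Chars.stripChars (PySem.List.slice url (some 15) none) ['/']
    let segments := (PySem.Chars.splitOn repo_part ['/']).filter (fun seg => !seg.isEmpty)
    if segments.length < 2 then "" else
    let owner := (PySem.List.pyGet? segments 0).getD []
    let repo0 := (PySem.List.pyGet? segments 1).getD []
    let repo := if PySem.Chars.endswith repo0 ".git".toList then PySem.List.slice repo0 none (some (-4)) else repo0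
    String.ofList ("git@github.com:".toList ++ owner ++ ['/'] ++ repo ++ ".git".toList)
  else
    let url1 := if PySem.Chars.isIn "/tree/".toList url then pySplit1Head url "/tree/".toList else url
    let url2 := pySplit1Head url1 ['?']
    let url3 := pySplit1Head url2 ['#']
    let url4 := pyRstripSlash url3
    if !(PySem.Chars.startswith url4 "http://".toList) && !(PySem.Chars.startswith url4 "https://".toList) then "" else
    let parts := (PySem.Chars.splitOn url4 ['/']).filter (fun seg => !seg.isEmpty)
    if parts.length < 5 then "" else
    let owner := (PySem.List.pyGet? parts 3).getD []
    let repo0 := (PySem.List.pyGet? parts 4).getD []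
    let repo := if PySem.Chars.endswith repo0 ".git".toList then PySem.List.slice repo0 none (some (-4)) else repo0
    String.ofList ("https://github.com/".toList ++ owner ++ ['/'] ++ repo ++ ".git".toList)

-- ===== PORT B =====
-- the while loop of Source B: i walks the string; a run of non-'/' chars from position i is the
-- segment body[i:j] (= c :: takeWhile of the tail), and i := j is the dropWhile of the tail
def pyScanGo (skip : Nat) (l : List Char) (seen : Nat) (owner repo : List Char) : List Char × List Char :=
  match l with
  | [] => (owner, repo)
  | c :: t =>
    if c == '/' then pyScanGo skip t seen owner repo
    else
      let seg := c :: t.takeWhile (fun x => !(x == '/'))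
      let rest := t.dropWhile (fun x => !(x == '/'))
      if seen == skip then pyScanGo skip rest (seen + 1) seg repo
      else if seen == skip + 1 then (owner, seg)
      else pyScanGo skip rest (seen + 1) owner repo
termination_by l.length
decreasing_by
  · simp
  · simpa using Nat.lt_succ_of_le (List.length_dropWhile_le _ t)
  · simpa using Nat.lt_succ_of_le (List.length_dropWhile_le _ t)

-- shared tail of Source B: the scan plus the final guard and formatting
def pyFinish (pre body : List Char) (skip : Nat) : String :=
  let op := pyScanGo skip body 0 [] []
  if op.2.isEmpty then "" else
  -- repo.removesuffix('.git')
  let repo := if PySem.Chars.endswith op.2 ".git".toList then op.2.take (op.2.length - 4) else op.2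
  String.ofList (pre ++ op.1 ++ ['/'] ++ repo ++ ".git".toList)

def normalize_github_repo_url_py_alt (addons_url : String) : String :=
  let url := PySem.Chars.strip addons_url.toList
  if !(PySem.Chars.isIn "github.com".toList url) then "" else
  if PySem.Chars.startswith url "git@github.com:".toList then
    pyFinish "git@github.com:".toList (PySem.List.slice url (some 15) none) 0
  else
    -- cut = min over ('/tree/', '?', '#') of the first occurrence, seeded with len(url)
    let cut := ["/tree/".toList, ['?'], ['#']].foldl
      (fun cut d =>
        let pos := PySem.Chars.find url d
        if 0 ≤ pos ∧ pos < cut then pos else cut) ((url.length : Int))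
    let body := List.rdropWhile (fun c => c == '/') (PySem.List.slice url none (some cut))
    if PySem.Chars.startswith body "http://".toList || PySem.Chars.startswith body "https://".toList then
      pyFinish "https://github.com/".toList body 3
    else ""

-- ===== PRECONDITION & SPEC =====
def Spec_normalize_github_repo_url_py (addons_url : String) (out : String) : Prop := out = normalize_github_repo_url_py_alt addons_url
instance (addons_url : String) (out : String) : Decidable (Spec_normalize_github_repo_url_py addons_url out) := by unfold Spec_normalize_github_repo_url_py; infer_instance

-- ===== CLAIM (what is proved, stated in full; the proofs are below) =====
def Claim_equal_normalize_github_repo_url_py : Prop := ∀ (addons_url : String), Dom_normalize_github_repo_url_py addons_url → Spec_normalize_github_repo_url_py addons_url (normalize_github_repo_url_py addons_url)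

-- ===== LEMMAS AND PROOFS =====

-- find.go structural equations and index shift
lemma findGo_eq (sub : List Char) (c : Char) (t : List Char) (m : Nat) :
    PySem.Chars.find.go sub (c :: t) m =
      if sub.isPrefixOf (c :: t) then (m : Int) else PySem.Chars.find.go sub t (m + 1) := by
  rw [PySem.Chars.find.go]

lemma findGo_shift (sub l : List Char) (k : Nat) :
    PySem.Chars.find.go sub l k =
      if PySem.Chars.find.go sub l 0 = -1 then -1 else PySem.Chars.find.go sub l 0 + k := by
  induction l generalizing k with
  | nil =>
    simp only [PySem.Chars.find.go]
    split <;> simp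
  | cons c t ih =>
    rw [findGo_eq, findGo_eq]
    by_cases hp : sub.isPrefixOf (c :: t)
    · simp [hp]
    · simp only [hp, Bool.false_eq_true, if_false]
      rw [ih (k + 1), ih 1]
      by_cases h : PySem.Chars.find.go sub t 0 = -1
      · simp [h]
      · have hge : -1 ≤ PySem.Chars.find.go sub t 0 := by
          have := PySem.Chars.neg_one_le_find t sub
          simpa [PySem.Chars.find] using this
        have h1 : PySem.Chars.find.go sub t 0 + 1 ≠ -1 := by omega
        simp only [h, if_false]
        push_cast
        omega

lemma find_nil (sub : List Char) (h : sub ≠ []) : PySem.Chars.find [] sub = -1 := by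
  simp [PySem.Chars.find, PySem.Chars.find.go, h]

lemma find_cons (sub : List Char) (c : Char) (t : List Char) :
    PySem.Chars.find (c :: t) sub =
      if sub.isPrefixOf (c :: t) then 0
      else if PySem.Chars.find t sub = -1 then -1 else PySem.Chars.find t sub + 1 := by
  simp only [PySem.Chars.find]
  rw [findGo_eq]
  by_cases hp : sub.isPrefixOf (c :: t)
  · simp [hp]
  · simp only [hp, Bool.false_eq_true, if_false]
    simpa using findGo_shift sub t 1

-- a found occurrence fits inside the string
lemma find_bound (u sub : List Char) (hsub : sub ≠ []) (h : 0 ≤ PySem.Chars.find u sub) :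
    PySem.Chars.find u sub + sub.length ≤ u.length := by
  induction u with
  | nil => rw [find_nil sub hsub] at h; omega
  | cons c t ih =>
    rw [find_cons] at h ⊢
    by_cases hp : sub.isPrefixOf (c :: t)
    · simp only [hp, if_true]
      have := (List.isPrefixOf_iff_prefix.mp hp).length_le
      omega
    · simp only [hp, Bool.false_eq_true, if_false] at h ⊢
      by_cases hn : PySem.Chars.find t sub = -1
      · simp [hn] at h
      · simp only [hn, if_false] at h ⊢
        have := ih (by omega)
        simp only [List.length_cons]
        omega

-- first occurrence of a single char in a prefix
lemma find_take_single (u : List Char) (c : Char) (k : Nat) :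
    PySem.Chars.find (u.take k) [c] =
      if 0 ≤ PySem.Chars.find u [c] ∧ PySem.Chars.find u [c] < (k : Int)
      then PySem.Chars.find u [c] else -1 := by
  induction u generalizing k with
  | nil =>
    rw [List.take_nil, find_nil [c] (by simp)]
    simp
  | cons x t ih =>
    cases k with
    | zero =>
      rw [List.take_zero, find_nil [c] (by simp)]
      have := PySem.Chars.neg_one_le_find (x :: t) [c]
      by_cases h : 0 ≤ PySem.Chars.find (x :: t) [c] ∧ PySem.Chars.find (x :: t) [c] < ((0 : Nat) : Int)
      · omega
      · simp
    | succ k =>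
      rw [List.take_succ_cons, find_cons [c] x (t.take k), find_cons [c] x t]
      by_cases hp : [c].isPrefixOf (x :: t)
      · have hp2 : [c].isPrefixOf (x :: t.take k) := by
          simp [List.isPrefixOf] at hp ⊢
          exact hp
        simp [hp, hp2]
      · have hp2 : ¬ [c].isPrefixOf (x :: t.take k) := by
          simp [List.isPrefixOf] at hp ⊢
          exact hp
        simp only [hp, hp2, Bool.false_eq_true, if_false]
        rw [ih k]
        have hge := PySem.Chars.neg_one_le_find t [c]
        by_cases hn : PySem.Chars.find t [c] = -1
        · simp [hn]
        · obtain ⟨m, hm⟩ : ∃ m : Nat, PySem.Chars.find t [c] = (m : Int) :=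
            ⟨(PySem.Chars.find t [c]).toNat, by omega⟩
          rw [hm]
          by_cases hk : (m : Int) < (k : Int)
          · have h1 : (0:Int) ≤ m ∧ (m:Int) < k := ⟨by positivity, hk⟩
            have h2 : (m:Int) ≠ -1 := by omega
            have h3 : (0:Int) ≤ (m:Int) + 1 ∧ (m:Int) + 1 < (k+1 : Nat) := by push_cast; omega
            simp only [if_pos h1, h2, if_false, if_pos h3]
          · have h1 : ¬((0:Int) ≤ m ∧ (m:Int) < k) := by omega
            rw [if_neg h1]
            split_ifs <;> omega

-- splitOnMax.go structural equations
lemma smGo_zero (sep : List Char) (m : Nat) (l cur : List Char) (acc : List (List Char)) :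
    PySem.Chars.splitOnMax.go sep 0 m l cur acc = ((cur.reverse ++ l) :: acc).reverse := by
  rw [PySem.Chars.splitOnMax.go]

lemma smGo_nil (sep : List Char) (f m : Nat) (cur : List Char) (acc : List (List Char)) :
    PySem.Chars.splitOnMax.go sep (f + 1) m [] cur acc = (cur.reverse :: acc).reverse := by
  rw [PySem.Chars.splitOnMax.go]
  omega

lemma smGo_cons (sep : List Char) (f m : Nat) (c : Char) (rest cur : List Char) (acc : List (List Char)) :
    PySem.Chars.splitOnMax.go sep (f + 1) m (c :: rest) cur acc =
      if m = 0 then ((cur.reverse ++ (c :: rest)) :: acc).reverse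
      else if sep.isPrefixOf (c :: rest) then
        PySem.Chars.splitOnMax.go sep f (m - 1) (List.drop sep.length (c :: rest)) [] (cur.reverse :: acc)
      else PySem.Chars.splitOnMax.go sep f m rest (c :: cur) acc := by
  rw [PySem.Chars.splitOnMax.go]

lemma smGo_m0 (sep : List Char) (f : Nat) (l cur : List Char) (acc : List (List Char)) :
    PySem.Chars.splitOnMax.go sep f 0 l cur acc = ((cur.reverse ++ l) :: acc).reverse := by
  cases f with
  | zero => exact smGo_zero ..
  | succ f =>
    cases l with
    | nil => simp [smGo_nil]
    | cons c rest => simp [smGo_cons]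

lemma splitOnMaxGo_one (sep : List Char) (hsep : sep ≠ []) :
    ∀ (f : Nat) (l cur : List Char), l.length < f →
      PySem.Chars.splitOnMax.go sep f 1 l cur [] =
        if 0 ≤ PySem.Chars.find l sep then
          [cur.reverse ++ l.take (PySem.Chars.find l sep).toNat,
           l.drop ((PySem.Chars.find l sep).toNat + sep.length)]
        else [cur.reverse ++ l] := by
  intro f
  induction f with
  | zero => intro l cur h; omega
  | succ f ih =>
    intro l cur h
    cases l with
    | nil =>
      rw [smGo_nil, find_nil sep hsep]
      norm_num
    | cons c rest =>
      rw [smGo_cons, find_cons sep c rest]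
      simp only [one_ne_zero, if_false]
      by_cases hp : sep.isPrefixOf (c :: rest)
      · simp only [hp, if_true]
        rw [smGo_m0]
        norm_num
      · simp only [hp, Bool.false_eq_true, if_false]
        rw [ih rest (c :: cur) (by simpa using Nat.lt_of_succ_lt_succ h)]
        have hge : -1 ≤ PySem.Chars.find rest sep := PySem.Chars.neg_one_le_find rest sep
        by_cases hfound : PySem.Chars.find rest sep = -1
        · simp [hfound]
        · obtain ⟨k, hk⟩ : ∃ k : Nat, PySem.Chars.find rest sep = (k : Int) :=
            ⟨(PySem.Chars.find rest sep).toNat, by omega⟩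
          have h0 : (0:Int) ≤ (k:Int) := by positivity
          have h1 : ¬((k:Int) = -1) := by omega
          have h2 : (0:Int) ≤ (k:Int) + 1 := by positivity
          simp only [hk, h0, if_true, h1, if_false, h2]
          have e1 : ((k:Int) + 1).toNat = k + 1 := by omega
          have e2 : ((k:Int)).toNat = k := by omega
          simp [e1, e2, List.take_succ_cons, List.drop_succ_cons, Nat.add_right_comm]

-- url.split(sep, 1)[0] cuts at the first occurrence of sep
lemma split1Head_eq (u sep : List Char) (hsep : sep ≠ []) :
    pySplit1Head u sep =
      if 0 ≤ PySem.Chars.find u sep then u.take (PySem.Chars.find u sep).toNat else u := by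
  unfold pySplit1Head PySem.Chars.splitOnMax
  norm_num
  rw [splitOnMaxGo_one sep hsep (u.length + 1) u [] (by omega)]
  by_cases h : 0 ≤ PySem.Chars.find u sep <;> simp [h]

-- splitOn.go structural equations and the bridge to Mathlib's splitOnP
lemma soGo_nil (sep : List Char) (f : Nat) (cur : List Char) (acc : List (List Char)) :
    PySem.Chars.splitOn.go sep (f + 1) [] cur acc = (cur.reverse :: acc).reverse := by
  rw [PySem.Chars.splitOn.go]
  omega

lemma soGo_cons (sep : List Char) (f : Nat) (c : Char) (rest cur : List Char) (acc : List (List Char)) :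
    PySem.Chars.splitOn.go sep (f + 1) (c :: rest) cur acc =
      if sep.isPrefixOf (c :: rest) then
        PySem.Chars.splitOn.go sep f (List.drop sep.length (c :: rest)) [] (cur.reverse :: acc)
      else PySem.Chars.splitOn.go sep f rest (c :: cur) acc := by
  rw [PySem.Chars.splitOn.go]

lemma splitOnGo_eq (c : Char) :
    ∀ (f : Nat) (l cur : List Char) (acc : List (List Char)), l.length < f →
      PySem.Chars.splitOn.go [c] f l cur acc =
        acc.reverse ++ List.modifyHead (cur.reverse ++ ·) (List.splitOnP (· == c) l) := by
  intro f
  induction f with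
  | zero => intro l cur acc h; omega
  | succ f ih =>
    intro l cur acc h
    cases l with
    | nil => simp [soGo_nil, List.splitOnP_nil]
    | cons x rest =>
      rw [soGo_cons, List.splitOnP_cons]
      by_cases hp : [c].isPrefixOf (x :: rest)
      · have hx : (x == c) = true := by
          simp [List.isPrefixOf] at hp
          simp [hp]
        simp only [hp, if_true, hx]
        rw [show List.drop [c].length (x :: rest) = rest by simp]
        rw [ih rest [] _ (by simpa using Nat.lt_of_succ_lt_succ h)]
        cases List.splitOnP (fun x => x == c) rest with
        | nil => simp
        | cons a t => simp
      · have hx : (x == c) = false := by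
          simp [List.isPrefixOf] at hp ⊢
          exact fun e => hp e.symm
        simp only [hp, Bool.false_eq_true, if_false, hx]
        rw [ih rest (x :: cur) acc (by simpa using Nat.lt_of_succ_lt_succ h)]
        rw [List.modifyHead_modifyHead]
        have hf : ((fun y => cur.reverse ++ y) ∘ List.cons x) = (fun y => (x :: cur).reverse ++ y) := by
          funext y; simp
        rw [hf]

lemma splitOn_eq_splitOnP (l : List Char) (c : Char) :
    PySem.Chars.splitOn l [c] = List.splitOnP (· == c) l := by
  unfold PySem.Chars.splitOn
  rw [splitOnGo_eq c (l.length + 1) l [] [] (by omega)]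
  cases List.splitOnP (fun x => x == c) l with
  | nil => simp
  | cons a t => simp

-- nonempty '/'-segments: helper notion used only by the proofs
def segsP (l : List Char) : List (List Char) :=
  (List.splitOnP (· == '/') l).filter (fun seg => !seg.isEmpty)

lemma segsP_slash_cons (l : List Char) : segsP ('/' :: l) = segsP l := by
  simp [segsP, List.splitOnP_cons]

lemma splitOnP_concat_pos (p : Char → Bool) (c : Char) (hp : p c = true) :
    ∀ l : List Char, List.splitOnP p (l ++ [c]) = List.splitOnP p l ++ [[]] := by
  intro l
  induction l with
  | nil => simp [List.splitOnP_cons, List.splitOnP_nil, hp]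
  | cons x t ih =>
    by_cases hx : p x
    · simp [List.splitOnP_cons, hx, ih]
    · simp only [List.cons_append, List.splitOnP_cons, hx, Bool.false_eq_true, if_false, ih]
      cases h : List.splitOnP p t with
      | nil => exact absurd h (List.splitOnP_ne_nil p t)
      | cons a u => simp

lemma segsP_concat_slash (l : List Char) : segsP (l ++ ['/']) = segsP l := by
  simp [segsP, splitOnP_concat_pos (· == '/') '/' (by simp) l]

lemma segsP_dropWhile (l : List Char) : segsP (List.dropWhile (fun c => c == '/') l) = segsP l := by
  induction l with
  | nil => rfl
  | cons x t ih =>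
    by_cases hx : (x == '/') = true
    · have hx' : x = '/' := by simpa using hx
      rw [List.dropWhile_cons, if_pos hx, ih, hx', segsP_slash_cons]
    · rw [List.dropWhile_cons, if_neg hx]

lemma segsP_rdropWhile (l : List Char) : segsP (List.rdropWhile (fun c => c == '/') l) = segsP l := by
  induction l using List.reverseRecOn with
  | nil => rfl
  | append_singleton t x ih =>
    by_cases hx : (x == '/') = true
    · have hx' : x = '/' := by simpa using hx
      rw [List.rdropWhile_concat_pos (fun c => c == '/') t x hx, ih, hx', segsP_concat_slash]
    · rw [List.rdropWhile_concat_neg (fun c => c == '/') t x hx]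

lemma stripChars_slash (x : List Char) :
    PySem.Chars.stripChars x ['/'] =
      List.rdropWhile (fun c => c == '/') (List.dropWhile (fun c => c == '/') x) := by
  have hp : (fun c => ['/'].contains c) = (fun c : Char => c == '/') := by
    funext c
    rw [Bool.eq_iff_iff]
    simp
  unfold PySem.Chars.stripChars List.rdropWhile
  simp only [hp]

-- stripping '/' from both ends does not change the nonempty segments
lemma segs_stripChars (x : List Char) :
    segsP (PySem.Chars.stripChars x ['/']) = segsP x := by
  rw [stripChars_slash]
  exact (segsP_rdropWhile _).trans (segsP_dropWhile x)

-- first-chunk decomposition of splitOnP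
lemma splitOnP_decomp (p : Char → Bool) (l : List Char) :
    List.splitOnP p l = l.takeWhile (fun x => !p x) ::
      (match l.dropWhile (fun x => !p x) with
       | [] => []
       | _ :: r => List.splitOnP p r) := by
  induction l with
  | nil => simp [List.splitOnP_nil]
  | cons c t ih =>
    by_cases hc : p c = true
    · simp [List.splitOnP_cons, hc]
    · have hc' : p c = false := by simpa using hc
      simp only [List.splitOnP_cons, hc', Bool.false_eq_true, if_false, ih,
        List.modifyHead_cons, List.takeWhile_cons, List.dropWhile_cons, Bool.not_false, if_true]

-- the head of a dropWhile result fails the predicate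
lemma dropWhile_head_not (p : Char → Bool) (l : List Char) (x : Char) (r : List Char)
    (h : l.dropWhile p = x :: r) : p x = false := by
  induction l with
  | nil => simp at h
  | cons a t ih =>
    rw [List.dropWhile_cons] at h
    by_cases ha : p a = true
    · rw [if_pos ha] at h; exact ih h
    · rw [if_neg ha] at h
      cases h
      simpa using ha

lemma segsP_ne (c : Char) (t : List Char) (hc : (c == '/') = false) :
    segsP (c :: t) = (c :: t.takeWhile (fun x => !(x == '/'))) ::
      segsP (t.dropWhile (fun x => !(x == '/'))) := by
  unfold segsP
  rw [splitOnP_decomp (· == '/') (c :: t)]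
  rw [List.takeWhile_cons, List.dropWhile_cons]
  simp only [hc, Bool.not_false, if_true]
  rw [List.filter_cons]
  simp only [List.isEmpty_cons, Bool.not_false, if_true]
  congr 1
  cases h : t.dropWhile (fun x => !(x == '/')) with
  | nil => simp [List.splitOnP_nil]
  | cons x r =>
    have hx : (!(x == '/')) = false := dropWhile_head_not _ t x r h
    have hx' : x = '/' := by simpa using hx
    have := segsP_slash_cons r
    unfold segsP at this
    rw [hx']
    exact this.symm

-- every kept segment is nonempty
lemma segsP_mem_ne (l : List Char) (s : List Char) (h : s ∈ segsP l) : s.isEmpty = false := by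
  unfold segsP at h
  have := (List.mem_filter.mp h).2
  simpa using this

-- the break mode of the scan: seen = skip + 1 returns the first nonempty segment
lemma scan_break (skip : Nat) (n : Nat) :
    ∀ (l : List Char), l.length ≤ n → ∀ (owner repo : List Char),
      pyScanGo skip l (skip + 1) owner repo =
        (owner, match segsP l with | [] => repo | s :: _ => s) := by
  induction n with
  | zero =>
    intro l hl owner repo
    rw [List.length_eq_zero_iff.mp (Nat.le_zero.mp hl)]
    simp [pyScanGo, segsP, List.splitOnP_nil]
  | succ n ih =>
    intro l hl owner repo
    match l with
    | [] => simp [pyScanGo, segsP, List.splitOnP_nil]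
    | c :: t =>
      rw [pyScanGo]
      by_cases hc : (c == '/') = true
      · have hc' : c = '/' := by simpa using hc
        rw [if_pos hc, hc', segsP_slash_cons]
        exact ih t (by simpa using hl) owner repo
      · have hc' : (c == '/') = false := by simpa using hc
        rw [if_neg (by simp [hc'])]
        have h1 : (skip + 1 == skip) = false := by simp
        have h2 : (skip + 1 == skip + 1) = true := by simp
        simp only [h1, Bool.false_eq_true, if_false, h2, if_true]
        rw [segsP_ne c t hc']

-- the scan returns the skip-th and (skip+1)-th nonempty segments (defaults if missing)
lemma scan_spec_aux (skip : Nat) (n : Nat) :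
    ∀ (l : List Char), l.length ≤ n → ∀ (seen : Nat) (owner repo : List Char), seen ≤ skip →
      pyScanGo skip l seen owner repo =
        ((segsP l).getD (skip - seen) owner, (segsP l).getD (skip - seen + 1) repo) := by
  induction n with
  | zero =>
    intro l hl seen owner repo hs
    rw [List.length_eq_zero_iff.mp (Nat.le_zero.mp hl)]
    simp [pyScanGo, segsP, List.splitOnP_nil]
  | succ n ih =>
    intro l hl seen owner repo hs
    match l with
    | [] => simp [pyScanGo, segsP, List.splitOnP_nil]
    | c :: t =>
      rw [pyScanGo]
      by_cases hc : (c == '/') = true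
      · have hc' : c = '/' := by simpa using hc
        rw [if_pos hc, hc', segsP_slash_cons]
        exact ih t (by simpa using hl) seen owner repo hs
      · have hc' : (c == '/') = false := by simpa using hc
        rw [if_neg (by simp [hc'])]
        rw [segsP_ne c t hc']
        have hlen : (t.dropWhile (fun x => !(x == '/'))).length ≤ n := by
          have := List.length_dropWhile_le (fun x => !(x == '/')) t
          simp at hl
          omega
        by_cases hseen : seen = skip
        · subst hseen
          simp only [beq_self_eq_true, if_true]
          rw [scan_break _ n _ hlen]
          simp only [Nat.sub_self, List.getD_cons_zero, Nat.zero_add, List.getD_cons_succ]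
          cases segsP (t.dropWhile (fun x => !(x == '/'))) with
          | nil => simp
          | cons s rest => simp
        · have hlt : seen < skip := by omega
          have h1 : (seen == skip) = false := by simp; omega
          have h2 : (seen == skip + 1) = false := by simp; omega
          simp only [h1, Bool.false_eq_true, if_false, h2]
          rw [ih _ hlen (seen + 1) owner repo (by omega)]
          have e1 : skip - seen = (skip - (seen + 1)) + 1 := by omega
          rw [e1]
          simp

lemma scan_spec (skip : Nat) (l : List Char) (owner repo : List Char) :
    pyScanGo skip l 0 owner repo =
      ((segsP l).getD skip owner, (segsP l).getD (skip + 1) repo) := by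
  simpa using scan_spec_aux skip l.length l le_rfl 0 owner repo (Nat.zero_le _)

-- repo[:-4] is removesuffix-style take
lemma slice_neg4 (l : List Char) : PySem.List.slice l none (some (-4)) = l.take (l.length - 4) := by
  simp only [PySem.List.slice, PySem.List.clampIdx]
  norm_num
  split <;> omega

-- (pyGet? xs n).getD [] for a nonnegative index is getD
lemma pyGet?_getD_eq (xs : List (List Char)) (n : Nat) :
    (PySem.List.pyGet? xs (n : Int)).getD [] = xs.getD n [] := by
  rw [PySem.List.pyGet?_natCast]
  rw [List.getD_eq_getElem?_getD]

lemma rstrip_eq (u : List Char) : pyRstripSlash u = List.rdropWhile (fun c => c == '/') u := rfl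

lemma segsP_def (l : List Char) :
    (List.splitOnP (· == '/') l).filter (fun seg => !seg.isEmpty) = segsP l := rfl

-- equal segment lists give equal pyFinish results
lemma pyFinish_congr (pre p1 p2 : List Char) (skip : Nat) (h : segsP p1 = segsP p2) :
    pyFinish pre p1 skip = pyFinish pre p2 skip := by
  unfold pyFinish
  rw [scan_spec, scan_spec, h]

-- A's ssh extraction block, exactly as the port writes it, equals pyFinish at skip 0
lemma canon_git (path : List Char) :
    (let segments := (PySem.Chars.splitOn path ['/']).filter (fun seg => !seg.isEmpty)
     if segments.length < 2 then ("" : String) else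
     let owner := (PySem.List.pyGet? segments 0).getD []
     let repo0 := (PySem.List.pyGet? segments 1).getD []
     let repo := if PySem.Chars.endswith repo0 ".git".toList then PySem.List.slice repo0 none (some (-4)) else repo0
     String.ofList ("git@github.com:".toList ++ owner ++ ['/'] ++ repo ++ ".git".toList))
    = pyFinish "git@github.com:".toList path 0 := by
  unfold pyFinish
  rw [scan_spec, splitOn_eq_splitOnP, segsP_def]
  have e0 := pyGet?_getD_eq (segsP path) 0
  have e1 := pyGet?_getD_eq (segsP path) 1
  norm_num at e0 e1
  simp only [e0, e1, Nat.zero_add, List.getD_eq_getElem?_getD]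
  by_cases h : (segsP path).length < 2
  · rw [if_pos h]
    rw [List.getElem?_eq_none (show (segsP path).length ≤ 1 by omega)]
    simp
  · rw [if_neg h]
    have hmem : (segsP path)[1]?.getD [] ∈ segsP path := by
      rw [List.getElem?_eq_getElem (by omega)]
      exact List.getElem_mem _
    have hne := segsP_mem_ne _ _ hmem
    simp only [hne, Bool.false_eq_true, if_false, slice_neg4]

-- A's https extraction block, exactly as the port writes it, equals pyFinish at skip 3
lemma canon_https (path : List Char) :
    (let parts := (PySem.Chars.splitOn path ['/']).filter (fun seg => !seg.isEmpty)
     if parts.length < 5 then ("" : String) else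
     let owner := (PySem.List.pyGet? parts 3).getD []
     let repo0 := (PySem.List.pyGet? parts 4).getD []
     let repo := if PySem.Chars.endswith repo0 ".git".toList then PySem.List.slice repo0 none (some (-4)) else repo0
     String.ofList ("https://github.com/".toList ++ owner ++ ['/'] ++ repo ++ ".git".toList))
    = pyFinish "https://github.com/".toList path 3 := by
  unfold pyFinish
  rw [scan_spec, splitOn_eq_splitOnP, segsP_def]
  have e3 := pyGet?_getD_eq (segsP path) 3
  have e4 := pyGet?_getD_eq (segsP path) 4
  norm_num at e3 e4
  simp only [e3, e4, Nat.reduceAdd, List.getD_eq_getElem?_getD]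
  by_cases h : (segsP path).length < 5
  · rw [if_pos h]
    rw [List.getElem?_eq_none (show (segsP path).length ≤ 4 by omega)]
    simp
  · rw [if_neg h]
    have hmem : (segsP path)[4]?.getD [] ∈ segsP path := by
      rw [List.getElem?_eq_getElem (by omega)]
      exact List.getElem_mem _
    have hne := segsP_mem_ne _ _ hmem
    simp only [hne, Bool.false_eq_true, if_false, slice_neg4]

-- A's conditional '/tree/' split is a take at B's first min-cut step
lemma trunc_tree (u : List Char) :
    (if PySem.Chars.isIn "/tree/".toList u then pySplit1Head u "/tree/".toList else u) =
      u.take (if 0 ≤ PySem.Chars.find u "/tree/".toList ∧ PySem.Chars.find u "/tree/".toList < ((u.length : Int))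
              then PySem.Chars.find u "/tree/".toList else ((u.length : Int))).toNat := by
  have hge := PySem.Chars.neg_one_le_find u "/tree/".toList
  by_cases hf : PySem.Chars.find u "/tree/".toList = -1
  · have hni : PySem.Chars.isIn "/tree/".toList u = false := by
      by_contra hx
      have hx' : PySem.Chars.isIn "/tree/".toList u = true := by simpa using hx
      rw [PySem.Chars.isIn_iff_infix] at hx'
      exact (PySem.Chars.find_ne_neg_one_iff u "/tree/".toList).mpr hx' hf
    have hni' : ¬ (PySem.Chars.isIn "/tree/".toList u = true) := by rw [hni]; simp
    rw [if_neg hni', if_neg (by omega)]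
    simp
  · have h0 : 0 ≤ PySem.Chars.find u "/tree/".toList := by omega
    have hb := find_bound u "/tree/".toList (by decide) h0
    have hi : PySem.Chars.isIn "/tree/".toList u = true := by
      rw [PySem.Chars.isIn_iff_infix]
      exact (PySem.Chars.find_ne_neg_one_iff u "/tree/".toList).mp hf
    rw [if_pos hi, split1Head_eq u _ (by decide), if_pos h0,
      if_pos ⟨h0, by simp at hb ⊢; omega⟩]

-- a single-char split on an already-truncated url is the next min-cut step
lemma trunc_single (u : List Char) (c : Char) (cut : Int) (h0 : 0 ≤ cut) :
    pySplit1Head (u.take cut.toNat) [c] =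
      u.take (if 0 ≤ PySem.Chars.find u [c] ∧ PySem.Chars.find u [c] < cut
              then PySem.Chars.find u [c] else cut).toNat := by
  rw [split1Head_eq _ [c] (by simp), find_take_single u c cut.toNat]
  have hc : ((cut.toNat : Nat) : Int) = cut := by omega
  rw [hc]
  by_cases hp : 0 ≤ PySem.Chars.find u [c] ∧ PySem.Chars.find u [c] < cut
  · rw [if_pos hp, if_pos hp.1, if_pos hp, List.take_take]
    congr 1
    omega
  · rw [if_neg hp, if_neg (by omega : ¬ (0:Int) ≤ -1), if_neg hp]

-- ===== VERDICT (by name: the statement is the Claim_ definition above) =====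
theorem normalize_github_repo_url_py_spec : Claim_equal_normalize_github_repo_url_py := by
  intro s _
  unfold Spec_normalize_github_repo_url_py normalize_github_repo_url_py normalize_github_repo_url_py_alt
  generalize PySem.Chars.strip s.toList = u
  by_cases hin : PySem.Chars.isIn "github.com".toList u = true
  · have hne : u.isEmpty = false := by
      cases u with
      | nil => exact absurd hin (by decide)
      | cons a t => rfl
    simp only [hin, hne, Bool.not_true, Bool.or_false, Bool.false_eq_true, if_false]
    by_cases hgit : PySem.Chars.startswith u "git@github.com:".toList = true
    · simp only [hgit, if_true]
      rw [canon_git]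
      exact pyFinish_congr _ _ _ 0 (segs_stripChars _)
    · simp only [hgit, Bool.false_eq_true, if_false]
      simp only [List.foldl_cons, List.foldl_nil]
      rw [trunc_tree u]
      set c1 : Int := (if 0 ≤ PySem.Chars.find u "/tree/".toList ∧ PySem.Chars.find u "/tree/".toList < ((u.length : Int))
              then PySem.Chars.find u "/tree/".toList else ((u.length : Int))) with hc1
      have hb1 : 0 ≤ c1 := by
        rw [hc1]
        split_ifs with h
        · exact h.1
        · positivity
      rw [trunc_single u '?' c1 hb1]
      set c2 : Int := (if 0 ≤ PySem.Chars.find u ['?'] ∧ PySem.Chars.find u ['?'] < c1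
              then PySem.Chars.find u ['?'] else c1) with hc2
      have hb2 : 0 ≤ c2 := by
        rw [hc2]
        split_ifs with h
        · exact h.1
        · exact hb1
      rw [trunc_single u '#' c2 hb2]
      set c3 : Int := (if 0 ≤ PySem.Chars.find u ['#'] ∧ PySem.Chars.find u ['#'] < c2
              then PySem.Chars.find u ['#'] else c2) with hc3
      have hb3 : 0 ≤ c3 := by
        rw [hc3]
        split_ifs with h
        · exact h.1
        · exact hb2
      rw [PySem.List.slice_to u hb3, rstrip_eq]
      set v := List.rdropWhile (fun c => c == '/') (u.take c3.toNat) with hv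
      by_cases hh : PySem.Chars.startswith v "http://".toList = true
      · simp only [hh, Bool.not_true, Bool.false_and, Bool.false_eq_true, if_false, Bool.true_or, if_true]
        exact canon_https v
      · simp only [hh, Bool.not_false, Bool.true_and, Bool.false_or]
        by_cases hh2 : PySem.Chars.startswith v "https://".toList = true
        · simp only [hh2, Bool.not_true, Bool.false_eq_true, if_false, if_true]
          exact canon_https v
        · simp only [hh2, Bool.false_eq_true, Bool.not_false, if_true, if_false]
  · have hb : PySem.Chars.isIn "github.com".toList u = false := by simpa using hin
    simp only [hb, Bool.not_false, Bool.or_true, if_true]
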